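-- pv_equiv track=rewrite | github.com/bioAI-Oslo/column | src/utils.py | get_unique_lists
-- ===== SOURCE A (Python) =====
-- def get_unique_lists(super_list, number_of_sublist_elements):
--     """
--     For a super_list, f.ex. [0, 1, 2, 3, 4, 5, 6], return every combination with
--     number_of_sublist_elements elements. Combinations are ordered, sampled without
--     replacement. F.ex. [0, 1, 2] are included, but not [1, 0, 2] or [0, 0, 0].
--
--     Args:
--         super_list: list
--         number_of_sublist_elements: int
--
--     Returns: list
--     """
--     combinations = []
--
--     def _unique_lists(current_list, options):
--         if len(current_list) == number_of_sublist_elements: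
--             combinations.append([i for i in current_list])
--         else:
--             for o in options:
--                 new_options = [i for i in options if i > o]
--                 _unique_lists(current_list + [o], new_options)
--
--     _unique_lists([], super_list)
--
--     return combinations
-- ===== SOURCE B (Python) =====
-- def get_unique_lists(super_list, number_of_sublist_elements):
--     """Same result as A, built bottom-up: a pure recursive generator that
--     returns the list of suffixes directly instead of growing a shared prefix
--     and mutating an outer accumulator."""
--     def gen(options, k):
--         if k == 0:
--             return [[]]
--         return [[o] + rest
--                 for o in options
--                 for rest in gen([i for i in options if i > o], k - 1)]
--     return gen(super_list, number_of_sublist_elements)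
-- ===== Notes on version B (the rewrite author's own statement) =====
-- stated objective: simpler
-- what changed: Replaced the closure that grows a current_list prefix and appends to a shared outer accumulator with a pure recursive generator that counts the remaining depth down and returns the suffix lists directly via a nested comprehension (flatMap/map), no mutation.
import Mathlib
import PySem

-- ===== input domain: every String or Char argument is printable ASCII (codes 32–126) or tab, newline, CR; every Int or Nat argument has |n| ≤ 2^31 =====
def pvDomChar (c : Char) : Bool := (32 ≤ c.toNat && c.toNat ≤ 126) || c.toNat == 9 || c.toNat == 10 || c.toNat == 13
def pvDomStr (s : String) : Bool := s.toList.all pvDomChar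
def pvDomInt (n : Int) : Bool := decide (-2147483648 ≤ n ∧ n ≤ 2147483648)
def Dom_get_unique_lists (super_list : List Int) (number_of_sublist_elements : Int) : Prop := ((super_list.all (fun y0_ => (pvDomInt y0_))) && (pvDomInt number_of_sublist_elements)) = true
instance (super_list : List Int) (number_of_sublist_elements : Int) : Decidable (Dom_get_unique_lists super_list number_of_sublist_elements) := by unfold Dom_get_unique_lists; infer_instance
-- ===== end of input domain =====

-- B replaces A's accumulator-mutating prefix recursion with a pure bottom-up
-- generator that returns the suffix lists directly (objective: simpler).

-- termination fact cited by both ports' decreasing_by: the value-based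
-- filter 'i > o' with o drawn from opts is strictly shorter than opts
theorem filt_lt (o : Int) (opts : List Int) (ho : o ∈ opts) :
    (List.filter (fun x_1 => decide (o < x_1.1)) opts.attach).length < opts.length := by
  rw [← List.countP_eq_length_filter,
      List.countP_attach (p := fun i => decide (o < i)),
      List.countP_eq_length_filter]
  exact List.length_filter_lt_length_iff_exists.mpr ⟨o, ho, by simp⟩

-- ===== PORT A =====
-- the inner closure _unique_lists: cur is current_list, acc the shared
-- 'combinations' list it appends to; the for-loop over options is the foldl
def auxA (k : Int) (cur opts : List Int) (acc : List (List Int)) : List (List Int) :=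
  if (cur.length : Int) = k then acc ++ [cur]
  else opts.attach.foldl
    (fun a x => auxA k (cur ++ [x.1]) (opts.filter (fun i => decide (x.1 < i))) a) acc
termination_by opts.length
decreasing_by simp; exact filt_lt x.1 opts x.2

def get_unique_lists (super_list : List Int) (number_of_sublist_elements : Int) : List (List Int) :=
  auxA number_of_sublist_elements [] super_list []

-- ===== PORT B =====
-- Source B's gen: returns the list of suffixes; nested comprehension = flatMap/map
def genB (options : List Int) (k : Int) : List (List Int) :=
  if k = 0 then [[]]
  else options.attach.flatMap
    (fun x => (genB (options.filter (fun i => decide (x.1 < i))) (k - 1)).map (fun rest => x.1 :: rest))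
termination_by options.length
decreasing_by simp; exact filt_lt x.1 options x.2

def get_unique_lists_alt (super_list : List Int) (number_of_sublist_elements : Int) : List (List Int) :=
  genB super_list number_of_sublist_elements

-- ===== PRECONDITION & SPEC =====
def Spec_get_unique_lists (super_list : List Int) (number_of_sublist_elements : Int) (out : List (List Int)) : Prop := out = get_unique_lists_alt super_list number_of_sublist_elements
instance (super_list : List Int) (number_of_sublist_elements : Int) (out : List (List Int)) : Decidable (Spec_get_unique_lists super_list number_of_sublist_elements out) := by unfold Spec_get_unique_lists; infer_instance

-- ===== CLAIM (what is proved, stated in full; the proofs are below) =====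
def Claim_equal_get_unique_lists : Prop := ∀ (super_list : List Int) (number_of_sublist_elements : Int), Dom_get_unique_lists super_list number_of_sublist_elements → Spec_get_unique_lists super_list number_of_sublist_elements (get_unique_lists super_list number_of_sublist_elements)

-- ===== LEMMAS AND PROOFS =====

-- invariant: A's helper appends, in order, exactly cur ++ t for each suffix t
-- that B's generator produces from the same options and remaining depth
theorem auxA_eq (opts : List Int) (k : Int) (cur : List Int) (acc : List (List Int)) :
    auxA k cur opts acc = acc ++ (genB opts (k - cur.length)).map (fun t => cur ++ t) := by
  by_cases h : (cur.length : Int) = k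
  · have h0 : k - (cur.length : Int) = 0 := by omega
    rw [auxA, genB, if_pos h, if_pos h0]
    simp
  · have h0 : ¬ (k - (cur.length : Int) = 0) := by omega
    rw [auxA, genB, if_neg h, if_neg h0]
    rw [PySem.List.foldl_congr_mem' (g := fun a x =>
      a ++ (genB (opts.filter (fun i => decide (x.1 < i))) (k - (cur.length : Int) - 1)).map
             (fun t => (cur ++ [x.1]) ++ t))]
    · rw [PySem.List.foldl_append_eq_flatMap]
      congr 1
      rw [List.map_flatMap]
      apply List.flatMap_congr
      intro x hx
      rw [List.map_map]
      apply List.map_congr_left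
      intro t ht
      simp
    · intro x hx a
      rw [auxA_eq]
      have he : k - ((cur ++ [x.1]).length : Int) = k - (cur.length : Int) - 1 := by
        simp; omega
      rw [he]
termination_by opts.length
decreasing_by simp; exact ⟨x.1, x.2, le_refl _⟩

-- ===== VERDICT (by name: the statement is the Claim_ definition above) =====
theorem get_unique_lists_spec : Claim_equal_get_unique_lists := by
  intro super_list k _
  unfold Spec_get_unique_lists get_unique_lists get_unique_lists_alt
  rw [auxA_eq]
  simp
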